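-- pv_equiv track=rewrite | github.com/cdelfierro/Rosalind | algorithmic-heights/ddeg.py | ddeg
-- ===== SOURCE A (Python) =====
-- def ddeg(graph):
--     n_nodes, n_edges = graph[0]
--     adj_list = [[] for i in range(n_nodes)]
--     ddegree = [0] * n_nodes
--
--     for edge in graph[1:]:
--         adj_list[edge[0] - 1].append(edge[1])
--         adj_list[edge[1] - 1].append(edge[0])
--
--     for node, nodes_list in enumerate(adj_list):
--         for adj_node in nodes_list:
--             ddegree[node] += len(adj_list[adj_node - 1])
--
--     return ddegree
-- ===== SOURCE B (Python) =====
-- def ddeg(graph):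
--     n_nodes, n_edges = graph[0]
--     deg = [0] * n_nodes
--     for edge in graph[1:]:
--         deg[edge[0] - 1] += 1
--         deg[edge[1] - 1] += 1
--     ddegree = [0] * n_nodes
--     for edge in graph[1:]:
--         ddegree[edge[0] - 1] += deg[edge[1] - 1]
--         ddegree[edge[1] - 1] += deg[edge[0] - 1]
--     return ddegree
-- ===== Notes on version B (the rewrite author's own statement) =====
-- stated objective: simpler
-- what changed: B drops the adjacency-list structure entirely: one edge pass builds a flat degree array, a second edge pass accumulates ddegree[u] += deg[v] and ddegree[v] += deg[u], instead of materializing per-node adjacency lists and walking them node by node.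
import Mathlib
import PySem

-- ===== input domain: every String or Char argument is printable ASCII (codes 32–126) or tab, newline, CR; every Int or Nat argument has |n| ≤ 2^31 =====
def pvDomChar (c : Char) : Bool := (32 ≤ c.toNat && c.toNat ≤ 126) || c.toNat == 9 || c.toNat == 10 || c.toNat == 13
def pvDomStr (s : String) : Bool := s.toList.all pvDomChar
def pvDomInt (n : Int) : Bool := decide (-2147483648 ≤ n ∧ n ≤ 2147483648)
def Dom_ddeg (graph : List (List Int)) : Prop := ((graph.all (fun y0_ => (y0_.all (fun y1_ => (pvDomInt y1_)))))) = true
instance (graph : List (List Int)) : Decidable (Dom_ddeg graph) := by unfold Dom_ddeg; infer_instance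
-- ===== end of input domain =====

-- B replaces A's per-node adjacency lists by a flat degree array built in one edge pass and
-- a second edge pass accumulating neighbor degrees (objective: simpler).

-- ===== PORT A =====
-- adj_list[edge[0]-1].append(edge[1]); adj_list[edge[1]-1].append(edge[0])
def ddegAdjStep (adj : List (List Int)) (edge : List Int) : List (List Int) :=
  PySem.List.pySetD
    (PySem.List.pySetD adj (PySem.List.pyGetD edge 0 0 - 1)
      (PySem.List.pyGetD adj (PySem.List.pyGetD edge 0 0 - 1) [] ++ [PySem.List.pyGetD edge 1 0]))
    (PySem.List.pyGetD edge 1 0 - 1)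
    (PySem.List.pyGetD
      (PySem.List.pySetD adj (PySem.List.pyGetD edge 0 0 - 1)
        (PySem.List.pyGetD adj (PySem.List.pyGetD edge 0 0 - 1) [] ++ [PySem.List.pyGetD edge 1 0]))
      (PySem.List.pyGetD edge 1 0 - 1) [] ++ [PySem.List.pyGetD edge 0 0])

def ddeg (graph : List (List Int)) : List Int :=
  let header := PySem.List.pyGetD graph 0 []            -- n_nodes, n_edges = graph[0] (len-2 header required by Pre_)
  let n_nodes : Int := PySem.List.pyGetD header 0 0
  let adj0 : List (List Int) := (PySem.List.pyRange 0 n_nodes 1).map (fun _ => [])  -- [[] for i in range(n_nodes)]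
  let dd0 : List Int := PySem.List.pyRepeat [0] n_nodes                             -- [0] * n_nodes
  let adj := (PySem.List.slice graph (some 1) none).foldl ddegAdjStep adj0
  (PySem.List.enumerate adj).foldl (fun dd p =>
      p.2.foldl (fun dd adj_node =>
        PySem.List.pySetD dd p.1 (PySem.List.pyGetD dd p.1 0 +
          PySem.List.len (PySem.List.pyGetD adj (adj_node - 1) []))) dd) dd0

-- ===== PORT B =====
-- deg[edge[0]-1] += 1; deg[edge[1]-1] += 1
def ddegDegStep (deg : List Int) (edge : List Int) : List Int :=
  PySem.List.pySetD
    (PySem.List.pySetD deg (PySem.List.pyGetD edge 0 0 - 1)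
      (PySem.List.pyGetD deg (PySem.List.pyGetD edge 0 0 - 1) 0 + 1))
    (PySem.List.pyGetD edge 1 0 - 1)
    (PySem.List.pyGetD
      (PySem.List.pySetD deg (PySem.List.pyGetD edge 0 0 - 1)
        (PySem.List.pyGetD deg (PySem.List.pyGetD edge 0 0 - 1) 0 + 1))
      (PySem.List.pyGetD edge 1 0 - 1) 0 + 1)

-- ddegree[edge[0]-1] += deg[edge[1]-1]; ddegree[edge[1]-1] += deg[edge[0]-1]
def ddegAccStep (deg dd : List Int) (edge : List Int) : List Int :=
  PySem.List.pySetD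
    (PySem.List.pySetD dd (PySem.List.pyGetD edge 0 0 - 1)
      (PySem.List.pyGetD dd (PySem.List.pyGetD edge 0 0 - 1) 0 +
        PySem.List.pyGetD deg (PySem.List.pyGetD edge 1 0 - 1) 0))
    (PySem.List.pyGetD edge 1 0 - 1)
    (PySem.List.pyGetD
      (PySem.List.pySetD dd (PySem.List.pyGetD edge 0 0 - 1)
        (PySem.List.pyGetD dd (PySem.List.pyGetD edge 0 0 - 1) 0 +
          PySem.List.pyGetD deg (PySem.List.pyGetD edge 1 0 - 1) 0))
      (PySem.List.pyGetD edge 1 0 - 1) 0 +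
      PySem.List.pyGetD deg (PySem.List.pyGetD edge 0 0 - 1) 0)

def ddeg_alt (graph : List (List Int)) : List Int :=
  let header := PySem.List.pyGetD graph 0 []
  let n_nodes : Int := PySem.List.pyGetD header 0 0
  let deg := (PySem.List.slice graph (some 1) none).foldl ddegDegStep
    (PySem.List.pyRepeat [0] n_nodes)
  (PySem.List.slice graph (some 1) none).foldl (ddegAccStep deg)
    (PySem.List.pyRepeat [0] n_nodes)

-- ===== PRECONDITION & SPEC =====
-- Pre_ excludes exactly the inputs where Python A raises: an empty graph (IndexError on graph[0]),
-- a header whose length is not 2 (unpacking raises), an edge with fewer than two entries, or an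
-- edge label outside [1 - n_nodes, n_nodes] (IndexError; negative labels down to 1 - n_nodes are
-- accepted by Python's negative indexing and stay inside Pre_).
def Pre_ddeg (graph : List (List Int)) : Prop :=
  graph ≠ [] ∧ (graph.headD []).length = 2 ∧
  ∀ e ∈ graph.tail, 2 ≤ e.length ∧
    1 - (graph.headD []).getD 0 0 ≤ e.getD 0 0 ∧ e.getD 0 0 ≤ (graph.headD []).getD 0 0 ∧
    1 - (graph.headD []).getD 0 0 ≤ e.getD 1 0 ∧ e.getD 1 0 ≤ (graph.headD []).getD 0 0
instance (graph : List (List Int)) : Decidable (Pre_ddeg graph) := by unfold Pre_ddeg; infer_instance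

def pvWitness_ddeg : List (List Int) := [[3, 2], [1, 2], [2, 3]]

def Spec_ddeg (graph : List (List Int)) (out : List Int) : Prop := out = ddeg_alt graph
instance (graph : List (List Int)) (out : List Int) : Decidable (Spec_ddeg graph out) := by unfold Spec_ddeg; infer_instance

-- ===== CLAIM (what is proved, stated in full; the proofs are below) =====
def Claim_equal_ddeg : Prop := ∀ (graph : List (List Int)), Dom_ddeg graph → Pre_ddeg graph → Spec_ddeg graph (ddeg graph)

-- ===== LEMMAS AND PROOFS =====

theorem pv_map_pySetD {α β : Type} (g : α → β) (xs : List α) (i : Int) (v : α) :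
    (PySem.List.pySetD xs i v).map g = PySem.List.pySetD (xs.map g) i (g v) := by
  unfold PySem.List.pySetD PySem.List.pySet?
  cases h : PySem.List.pyIdx? xs.length i <;> simp [h, List.map_set]

-- appending x to the row at index i, seen through a "row summary" g, is adding u x at index i
theorem pv_map_step (g : List Int → Int) (u : Int → Int)
    (hg : ∀ r x, g (r ++ [x]) = g r + u x) (h0 : g [] = 0)
    (adj : List (List Int)) (i : Int) (x : Int) :
    (PySem.List.pySetD adj i (PySem.List.pyGetD adj i [] ++ [x])).map g
      = PySem.List.pySetD (adj.map g) i (PySem.List.pyGetD (adj.map g) i 0 + u x) := by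
  rw [pv_map_pySetD, hg]
  congr 2
  rw [← h0, PySem.List.pyGetD_map]

-- A's adjacency-building edge fold, seen through a row summary g, is a flat-array edge fold
theorem pv_map_adjfold (g : List Int → Int) (u : Int → Int)
    (hg : ∀ r x, g (r ++ [x]) = g r + u x) (h0 : g [] = 0)
    (es : List (List Int)) : ∀ acc : List (List Int),
    (es.foldl ddegAdjStep acc).map g
    = es.foldl (fun d edge =>
        PySem.List.pySetD
          (PySem.List.pySetD d (PySem.List.pyGetD edge 0 0 - 1)
            (PySem.List.pyGetD d (PySem.List.pyGetD edge 0 0 - 1) 0 + u (PySem.List.pyGetD edge 1 0)))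
          (PySem.List.pyGetD edge 1 0 - 1)
          (PySem.List.pyGetD
            (PySem.List.pySetD d (PySem.List.pyGetD edge 0 0 - 1)
              (PySem.List.pyGetD d (PySem.List.pyGetD edge 0 0 - 1) 0 + u (PySem.List.pyGetD edge 1 0)))
            (PySem.List.pyGetD edge 1 0 - 1) 0 + u (PySem.List.pyGetD edge 0 0))) (acc.map g) := by
  induction es with
  | nil => intro acc; rfl
  | cons e es ih =>
    intro acc
    simp only [List.foldl_cons]
    rw [ih]
    unfold ddegAdjStep
    rw [pv_map_step g u hg h0, pv_map_step g u hg h0]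

theorem pv_length_adjfold (es : List (List Int)) : ∀ acc : List (List Int),
    (es.foldl ddegAdjStep acc).length = acc.length := by
  induction es with
  | nil => intro acc; rfl
  | cons e es ih =>
    intro acc
    simp only [List.foldl_cons]
    rw [ih]
    unfold ddegAdjStep
    simp [PySem.List.length_pySetD]

theorem pv_set_append_cons {α : Type} (pre : List α) (y v : α) (t : List α) :
    (pre ++ y :: t).set pre.length v = pre ++ v :: t := by
  induction pre with
  | nil => rfl
  | cons p pre ih => simp

theorem pv_getD_append_cons {α : Type} (pre : List α) (y d : α) (t : List α) :
    (pre ++ y :: t).getD pre.length d = y := by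
  induction pre with
  | nil => rfl
  | cons p pre ih => simp

-- collapsing the inner 'for adj_node in nodes_list' loop: all writes hit index k
theorem pv_inner_collapse (T : Int → Int) (row : List Int) :
    ∀ (dd : List Int) (k : Nat), k < dd.length →
    row.foldl (fun dd ℓ => PySem.List.pySetD dd (k : Int) (PySem.List.pyGetD dd (k : Int) 0 + T ℓ)) dd
      = dd.set k (dd.getD k 0 + (row.map T).sum) := by
  induction row with
  | nil =>
    intro dd k hk
    simp only [List.foldl_nil, List.map_nil, List.sum_nil, add_zero]
    rw [List.getD_eq_getElem dd 0 hk]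
    exact (List.set_getElem_self hk).symm
  | cons ℓ row ih =>
    intro dd k hk
    simp only [PySem.List.pySetD_natCast, PySem.List.pyGetD_natCast] at ih ⊢
    rw [List.foldl_cons]
    rw [ih (dd.set k (dd.getD k 0 + T ℓ)) k (by simpa using hk)]
    rw [List.set_set]
    have hget : (dd.set k (dd.getD k 0 + T ℓ)).getD k 0 = dd.getD k 0 + T ℓ := by
      rw [List.getD_eq_getElem _ 0 (by simpa using hk)]
      simp
    rw [hget]
    simp [add_assoc]

-- the enumerate fold of A's second phase writes row sums pointwise
theorem pv_phase2 (T : Int → Int) (adj : List (List Int)) :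
    ∀ pre : List Int,
    (PySem.List.enumerate adj (pre.length : Int)).foldl
      (fun dd p => p.2.foldl
        (fun dd ℓ => PySem.List.pySetD dd p.1 (PySem.List.pyGetD dd p.1 0 + T ℓ)) dd)
      (pre ++ List.replicate adj.length 0)
    = pre ++ adj.map (fun row => (row.map T).sum) := by
  induction adj with
  | nil => intro pre; simp [PySem.List.enumerate_nil]
  | cons row adj ih =>
    intro pre
    rw [PySem.List.enumerate_cons, List.foldl_cons]
    have h1 : (pre ++ List.replicate (row :: adj).length 0)
        = pre ++ (0 : Int) :: List.replicate adj.length 0 := by simp [List.replicate]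
    rw [h1]
    have hk : pre.length < (pre ++ (0 : Int) :: List.replicate adj.length 0).length := by simp
    rw [pv_inner_collapse T row _ pre.length hk]
    rw [pv_getD_append_cons, pv_set_append_cons]
    have h2 : pre ++ ((0 : Int) + (row.map T).sum) :: List.replicate adj.length 0
        = (pre ++ [(row.map T).sum]) ++ List.replicate adj.length 0 := by simp
    rw [h2]
    have h3 : ((pre.length : Int) + 1) = (((pre ++ [(row.map T).sum]).length : Nat) : Int) := by simp
    rw [h3, ih (pre ++ [(row.map T).sum])]
    simp

theorem pv_main (graph : List (List Int)) : ddeg graph = ddeg_alt graph := by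
  unfold ddeg ddeg_alt
  dsimp only
  set header := PySem.List.pyGetD graph 0 ([] : List Int) with hheader
  set n : Int := PySem.List.pyGetD header 0 0 with hn
  set es := PySem.List.slice graph (some 1) none with hes
  have hadj0 : ((PySem.List.pyRange 0 n 1).map (fun _ => ([] : List Int)))
      = List.replicate n.toNat ([] : List Int) := by
    rw [List.eq_replicate_iff]
    constructor
    · simp [PySem.List.length_pyRange_one]
    · intro b hb
      rcases List.mem_map.mp hb with ⟨_, _, h⟩
      exact h.symm
  have hdd0 : PySem.List.pyRepeat [(0 : Int)] n = List.replicate n.toNat (0 : Int) :=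
    PySem.List.pyRepeat_singleton 0 n
  rw [hadj0, hdd0]
  set adjF := es.foldl ddegAdjStep (List.replicate n.toNat ([] : List Int)) with hadjF
  set T : Int → Int := fun ℓ => PySem.List.len (PySem.List.pyGetD adjF (ℓ - 1) []) with hT
  -- B's degree array is adjF seen through row length
  have hdeg : es.foldl ddegDegStep (List.replicate n.toNat (0 : Int))
      = adjF.map (fun r => ((r.length : Nat) : Int)) := by
    rw [hadjF,
      pv_map_adjfold (fun r => ((r.length : Nat) : Int)) (fun _ => (1 : Int))
        (by intro r x; simp) (by simp) es (List.replicate n.toNat [])]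
    unfold ddegDegStep
    simp
  -- deg lookups are exactly A's second-phase weight T
  have hTlookup : ∀ ℓ : Int,
      PySem.List.pyGetD (adjF.map (fun r => ((r.length : Nat) : Int))) (ℓ - 1) 0 = T ℓ := by
    intro ℓ
    have h0 : (0 : Int) = ((([] : List Int).length : Nat) : Int) := by simp
    rw [h0, PySem.List.pyGetD_map (fun r => ((r.length : Nat) : Int)) adjF (ℓ - 1) []]
    simp [hT, PySem.List.len_eq]
  rw [hdeg]
  have hlen : adjF.length = n.toNat := by
    rw [hadjF, pv_length_adjfold]; simp
  -- A's second phase is the row sums of adjF under T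
  have hA : (PySem.List.enumerate adjF).foldl (fun dd p =>
        p.2.foldl (fun dd adj_node =>
          PySem.List.pySetD dd p.1 (PySem.List.pyGetD dd p.1 0 +
            PySem.List.len (PySem.List.pyGetD adjF (adj_node - 1) []))) dd)
      (List.replicate n.toNat (0 : Int))
      = adjF.map (fun row => (row.map T).sum) := by
    have := pv_phase2 T adjF []
    simpa [hlen, hT] using this
  rw [hA]
  -- B's accumulation pass, with deg lookups rewritten to T, is the same row-sum map
  have hacc : ddegAccStep (adjF.map (fun r => ((r.length : Nat) : Int)))
      = (fun dd edge =>
        PySem.List.pySetD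
          (PySem.List.pySetD dd (PySem.List.pyGetD edge 0 0 - 1)
            (PySem.List.pyGetD dd (PySem.List.pyGetD edge 0 0 - 1) 0 + T (PySem.List.pyGetD edge 1 0)))
          (PySem.List.pyGetD edge 1 0 - 1)
          (PySem.List.pyGetD
            (PySem.List.pySetD dd (PySem.List.pyGetD edge 0 0 - 1)
              (PySem.List.pyGetD dd (PySem.List.pyGetD edge 0 0 - 1) 0 + T (PySem.List.pyGetD edge 1 0)))
            (PySem.List.pyGetD edge 1 0 - 1) 0 + T (PySem.List.pyGetD edge 0 0))) := by
    funext dd edge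
    unfold ddegAccStep
    simp only [hTlookup]
  rw [hacc, hadjF,
    pv_map_adjfold (fun row => (row.map T).sum) T
      (by intro r x; simp) (by simp) es (List.replicate n.toNat [])]
  simp

-- ===== VERDICT (by name: the statement is the Claim_ definition above) =====
theorem ddeg_spec : Claim_equal_ddeg := by
  intro graph _ _
  unfold Spec_ddeg
  exact pv_main graph
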